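-- pv_equiv track=rewrite | github.com/bolual11/.FLI-Flight-Logistics-Interchange-File-Format- | fli_reader.py | parse_records_from_body
-- ===== SOURCE A (Python) =====
-- def parse_records_from_body(plain_text):
--         records = []
--         # split body with "---" markers
--
--         # record_blocks = body.split("\n---\n")
--         for block in plain_text.split("\n---\n"):
--             rec = {}
--             # split each block into lines/pairs
--             lines = block.strip().split("\n")
--             for line in lines:
--                 if ": " in line:
--                     key, value = line.split(": ", 1)
--                     rec[key.strip()] = value.strip()
--             if rec:
--                 records.append(rec)
--         return records
-- ===== SOURCE B (Python) =====
-- def parse_records_from_body(plain_text):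
--     records = []
--     rec = {}
--     for line in plain_text.split("\n"):
--         if line == "---":
--             if rec:
--                 records.append(rec)
--             rec = {}
--         elif ": " in line:
--             key, value = line.split(": ", 1)
--             rec[key.strip()] = value.strip()
--     if rec:
--         records.append(rec)
--     return records
-- ===== Notes on version B (the rewrite author's own statement) =====
-- stated objective: simpler
-- what changed: B replaces A's nested two-level splitting (split the text on the five-character separator, then strip and re-split every block into lines) by a single flat pass over the line list that keeps one running record dict, flushing it at each separator line and once at the end.
-- intended difference: On inputs where a separator-delimited block, once right-stripped, has a last line ending in a colon with no earlier colon-space marker and the stripped-off whitespace tail begins with a space, A's block.strip() silently drops that trailing pair although A keeps the identical line anywhere else in a block; B uniformly parses it as a key with empty value, which is the intended, position-independent behaviour. — e.g. on parse_records_from_body("k: \n---\na: b"): A returns [[("a", "b")]], B returns [[("k", "")], [("a", "b")]]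
import Mathlib
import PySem

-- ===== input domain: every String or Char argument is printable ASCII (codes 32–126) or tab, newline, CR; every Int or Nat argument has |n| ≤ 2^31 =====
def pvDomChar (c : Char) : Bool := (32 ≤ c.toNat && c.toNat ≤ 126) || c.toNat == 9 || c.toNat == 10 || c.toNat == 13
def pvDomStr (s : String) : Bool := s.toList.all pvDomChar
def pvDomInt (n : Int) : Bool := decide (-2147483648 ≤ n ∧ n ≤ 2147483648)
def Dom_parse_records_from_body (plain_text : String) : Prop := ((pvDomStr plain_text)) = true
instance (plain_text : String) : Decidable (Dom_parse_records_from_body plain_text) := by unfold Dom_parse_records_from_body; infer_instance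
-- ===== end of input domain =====

-- B replaces A's nested block/line splitting by ONE flat pass over the lines with a running record
-- flushed at "---" lines (simpler); on the D_ corner below the two differ and B's value is the intended one.

-- ===== PORT A =====
def parse_records_from_body (plain_text : String) : List (List (String × String)) :=
  (PySem.Chars.splitOn plain_text.toList ['\n', '-', '-', '-', '\n']).foldl
    (fun records block =>
      let rec0 : PySem.Dict String String :=
        (PySem.Chars.splitOn (PySem.Chars.strip block) ['\n']).foldl
          (fun rec line =>
            if PySem.Chars.isIn [':', ' '] line then
              match PySem.Chars.splitOnMax line [':', ' '] 1 with
              | [key, value] =>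
                  rec.insert (String.ofList (PySem.Chars.strip key)) (String.ofList (PySem.Chars.strip value))
              | _ => rec
            else rec)
          (PySem.Dict.mk [])
      if rec0.items ≠ [] then records ++ [rec0.items] else records)
    []

-- ===== PORT B =====
def parse_records_from_body_alt (plain_text : String) : List (List (String × String)) :=
  let st :=
    (PySem.Chars.splitOn plain_text.toList ['\n']).foldl
      (fun (st : List (List (String × String)) × PySem.Dict String String) line =>
        if line == ['-', '-', '-'] then
          (if st.2.items ≠ [] then st.1 ++ [st.2.items] else st.1, PySem.Dict.mk [])
        else if PySem.Chars.isIn [':', ' '] line then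
          match PySem.Chars.splitOnMax line [':', ' '] 1 with
          | [] => st
          | [_] => st
          | key :: value :: _ =>
              (st.1, st.2.insert (String.ofList (PySem.Chars.strip key)) (String.ofList (PySem.Chars.strip value)))
        else st)
      ([], PySem.Dict.mk [])
  if st.2.items ≠ [] then st.1 ++ [st.2.items] else st.1

-- ===== PRECONDITION & SPEC =====
-- On inputs where a separator-delimited block, once right-stripped, has a last line that ends in a colon
-- carrying no earlier colon-space marker, while the stripped-off whitespace tail begins with a space,
-- A's block.strip() silently drops that trailing pair although A keeps the identical line anywhere else in
-- a block; B uniformly parses it as a key with empty value, which is the intended, position-independent value.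
def D_parse_records_from_body (plain_text : String) : Prop :=
  ∃ b ∈ PySem.Chars.splitOn plain_text.toList "\n---\n".toList,
    let l := (PySem.Chars.splitOn (PySem.Chars.rstrip b) "\n".toList).getLastD []
    PySem.Chars.endswith l ":".toList = true ∧ PySem.Chars.isIn ": ".toList l = false ∧
    PySem.List.pyGet? b ((PySem.Chars.rstrip b).length : Int) = some ' '
instance (plain_text : String) : Decidable (D_parse_records_from_body plain_text) := by
  unfold D_parse_records_from_body; infer_instance

def Spec_parse_records_from_body (plain_text : String) (out : List (List (String × String))) : Prop :=
  ¬ D_parse_records_from_body plain_text → out = parse_records_from_body_alt plain_text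
instance (plain_text : String) (out : List (List (String × String))) : Decidable (Spec_parse_records_from_body plain_text out) := by
  unfold Spec_parse_records_from_body; infer_instance

def pvDiffWitness_parse_records_from_body : String := "k: \n---\na: b"
def pvDiffWitnessOut_parse_records_from_body :
    (List (List (String × String))) × (List (List (String × String))) :=
  ([[("a", "b")]], [[("k", "")], [("a", "b")]])

-- ===== CLAIM (what is proved, stated in full; the proofs are below) =====
def Claim_unchanged_parse_records_from_body : Prop := ∀ (plain_text : String), Dom_parse_records_from_body plain_text → Spec_parse_records_from_body plain_text (parse_records_from_body plain_text)
def Claim_changed_parse_records_from_body : Prop := Dom_parse_records_from_body (pvDiffWitness_parse_records_from_body) ∧ D_parse_records_from_body (pvDiffWitness_parse_records_from_body) ∧ parse_records_from_body (pvDiffWitness_parse_records_from_body) = pvDiffWitnessOut_parse_records_from_body.1 ∧ parse_records_from_body_alt (pvDiffWitness_parse_records_from_body) = pvDiffWitnessOut_parse_records_from_body.2 ∧ pvDiffWitnessOut_parse_records_from_body.1 ≠ pvDiffWitnessOut_parse_records_from_body.2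

-- ===== LEMMAS AND PROOFS =====

-- Python-split as clean structural recursion (sep = s0 :: sr, so it is provably nonempty).
def pvSplit (s0 : Char) (sr : List Char) (l : List Char) : List (List Char) :=
  match l with
  | [] => [[]]
  | c :: rest =>
    if (s0 :: sr).isPrefixOf (c :: rest) then [] :: pvSplit s0 sr (List.drop sr.length rest)
    else (pvSplit s0 sr rest).modifyHead (c :: ·)
termination_by l.length
decreasing_by all_goals simp

-- first-occurrence split (line.split(": ", 1) shape)
def pvSplitFirst (s0 : Char) (sr : List Char) : List Char → Option (List Char × List Char)
  | [] => none
  | c :: rest =>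
    if (s0 :: sr).isPrefixOf (c :: rest) then some ([], List.drop sr.length rest)
    else (pvSplitFirst s0 sr rest).map (fun p => (c :: p.1, p.2))

def pvJoin (sep : List Char) : List (List Char) → List Char
  | [] => []
  | [x] => x
  | x :: y :: xs => x ++ sep ++ pvJoin sep (y :: xs)

-- the canonical per-line action shared by both ports
def pvStep (rec : PySem.Dict String String) (line : List Char) : PySem.Dict String String :=
  match pvSplitFirst ':' [' '] line with
  | some (k, v) => rec.insert (String.ofList (PySem.Chars.strip k)) (String.ofList (PySem.Chars.strip v))
  | none => rec

def pvBStep (st : List (List (String × String)) × PySem.Dict String String) (line : List Char) :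
    List (List (String × String)) × PySem.Dict String String :=
  if line == ['-', '-', '-'] then
    (if st.2.items ≠ [] then st.1 ++ [st.2.items] else st.1, PySem.Dict.mk [])
  else if PySem.Chars.isIn [':', ' '] line then
    match PySem.Chars.splitOnMax line [':', ' '] 1 with
    | [] => st
    | [_] => st
    | key :: value :: _ =>
        (st.1, st.2.insert (String.ofList (PySem.Chars.strip key)) (String.ofList (PySem.Chars.strip value)))
  else st

def pvFin (st : List (List (String × String)) × PySem.Dict String String) : List (List (String × String)) :=
  if st.2.items ≠ [] then st.1 ++ [st.2.items] else st.1

def pvParse (b : List Char) : PySem.Dict String String :=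
  (pvSplit '\n' [] (PySem.Chars.strip b)).foldl pvStep (PySem.Dict.mk [])

def pvAStep (records : List (List (String × String))) (b : List Char) : List (List (String × String)) :=
  if (pvParse b).items ≠ [] then records ++ [(pvParse b).items] else records

def pvInterp : List (List Char) → List (List Char)
  | [] => []
  | [b] => pvSplit '\n' [] b
  | b :: c :: bs => pvSplit '\n' [] b ++ ['-', '-', '-'] :: pvInterp (c :: bs)

-- the bad-block condition (proof-level form of D_'s body)
def pvC (b : List Char) : Prop :=
  ((pvSplit '\n' [] (PySem.Chars.rstrip b)).getLastD []).getLast? = some ':' ∧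
  ¬ [':', ' '] <:+: ((pvSplit '\n' [] (PySem.Chars.rstrip b)).getLastD []) ∧
  (List.drop (PySem.Chars.rstrip b).length b).head? = some ' '

-- ---- bridges between the PySem scanners and the structural versions ----
lemma pvSplit_ne_nil (s0 : Char) (sr l : List Char) : pvSplit s0 sr l ≠ [] := by
  induction l using pvSplit.induct s0 sr with
  | case1 => simp [pvSplit]
  | case2 c rest h ih => simp [pvSplit, h]
  | case3 c rest h ih =>
    rw [pvSplit]; simp only [if_neg h]
    cases hh : pvSplit s0 sr rest with
    | nil => exact absurd hh ih
    | cons a t => simp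

lemma pvSplitOn_go_eq (s0 : Char) (sr : List Char) :
    ∀ (fuel : Nat) (l cur : List Char) (acc : List (List Char)), l.length < fuel →
      PySem.Chars.splitOn.go (s0 :: sr) fuel l cur acc =
        acc.reverse ++ (pvSplit s0 sr l).modifyHead (cur.reverse ++ ·) := by
  intro fuel
  induction fuel with
  | zero => intro l cur acc h; omega
  | succ fuel ih =>
    intro l cur acc h
    cases l with
    | nil =>
      rw [PySem.Chars.splitOn.go]
      · simp [pvSplit]
      · omega
    | cons c rest =>
      rw [PySem.Chars.splitOn.go]
      rw [pvSplit]
      by_cases hp : (s0 :: sr).isPrefixOf (c :: rest)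
      · simp only [hp, if_true]
        have hrw := ih (List.drop (s0 :: sr).length (c :: rest)) [] (cur.reverse :: acc)
          (by simp at h ⊢; omega)
        rw [hrw]
        have hd : List.drop (s0 :: sr).length (c :: rest) = List.drop sr.length rest := by simp
        rw [hd]
        cases hq : pvSplit s0 sr (List.drop sr.length rest) with
        | nil => exact absurd hq (pvSplit_ne_nil s0 sr _)
        | cons a t => simp
      · simp only [hp]
        have hrw := ih rest (c :: cur) acc (by simp at h ⊢; omega)
        rw [hrw]
        cases hq : pvSplit s0 sr rest with
        | nil => exact absurd hq (pvSplit_ne_nil s0 sr _)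
        | cons a t => simp

lemma pvSplitOn_eq (s0 : Char) (sr l : List Char) :
    PySem.Chars.splitOn l (s0 :: sr) = pvSplit s0 sr l := by
  unfold PySem.Chars.splitOn
  rw [pvSplitOn_go_eq s0 sr (l.length + 1) l [] [] (by omega)]
  cases hq : pvSplit s0 sr l with
  | nil => exact absurd hq (pvSplit_ne_nil s0 sr _)
  | cons a t => simp

lemma pvSplitOnMax_go0_eq (s0 : Char) (sr : List Char) (fuel : Nat) (l cur : List Char) (acc : List (List Char)) :
    PySem.Chars.splitOnMax.go (s0 :: sr) fuel 0 l cur acc = acc.reverse ++ [cur.reverse ++ l] := by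
  cases fuel with
  | zero => rw [PySem.Chars.splitOnMax.go]; simp
  | succ fuel =>
    cases l with
    | nil => rw [PySem.Chars.splitOnMax.go] <;> simp
    | cons c rest => rw [PySem.Chars.splitOnMax.go] <;> simp

lemma pvSplitOnMax_go1_eq (s0 : Char) (sr : List Char) :
    ∀ (fuel : Nat) (l cur : List Char) (acc : List (List Char)), l.length < fuel →
      PySem.Chars.splitOnMax.go (s0 :: sr) fuel 1 l cur acc =
        acc.reverse ++ (match pvSplitFirst s0 sr l with
          | some (a, b) => [cur.reverse ++ a, b]
          | none => [cur.reverse ++ l]) := by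
  intro fuel
  induction fuel with
  | zero => intro l cur acc h; omega
  | succ fuel ih =>
    intro l cur acc h
    cases l with
    | nil =>
      rw [PySem.Chars.splitOnMax.go]
      · simp [pvSplitFirst]
      · omega
    | cons c rest =>
      rw [PySem.Chars.splitOnMax.go]
      show (if (1 : Nat) = 0 then _ else _) = _
      rw [if_neg (by omega)]
      by_cases hp : (s0 :: sr).isPrefixOf (c :: rest)
      · rw [if_pos hp]
        show PySem.Chars.splitOnMax.go (s0 :: sr) fuel (1 - 1) (List.drop (s0 :: sr).length (c :: rest)) [] (cur.reverse :: acc) = _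
        have h0 : (1 : Nat) - 1 = 0 := by omega
        rw [h0, pvSplitOnMax_go0_eq]
        rw [pvSplitFirst]; rw [if_pos hp]
        simp
      · rw [if_neg hp]
        have hrw := ih rest (c :: cur) acc (by simp at h ⊢; omega)
        rw [hrw]
        rw [pvSplitFirst]; rw [if_neg hp]
        cases hq : pvSplitFirst s0 sr rest with
        | none => simp
        | some p => cases p with | mk a b => simp

lemma pvSplitOnMax_eq (s0 : Char) (sr l : List Char) :
    PySem.Chars.splitOnMax l (s0 :: sr) 1 =
      (match pvSplitFirst s0 sr l with
        | some (a, b) => [a, b]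
        | none => [l]) := by
  unfold PySem.Chars.splitOnMax
  rw [if_neg (by omega)]
  have h1 : (1 : Int).toNat = 1 := by decide
  rw [h1, pvSplitOnMax_go1_eq s0 sr (l.length + 1) l [] [] (by omega)]
  cases hq : pvSplitFirst s0 sr l with
  | none => simp
  | some p => cases p with | mk a b => simp

-- ---- pvSplitFirst basics ----
lemma pvSplitFirst_eq_none_iff (s0 : Char) (sr : List Char) : ∀ l : List Char,
    pvSplitFirst s0 sr l = none ↔ ¬ (s0 :: sr) <:+: l := by
  intro l
  induction l with
  | nil => simp [pvSplitFirst]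
  | cons c rest ih =>
    rw [pvSplitFirst]
    by_cases hp : (s0 :: sr).isPrefixOf (c :: rest)
    · rw [if_pos hp]
      simp only [List.infix_cons_iff]
      constructor
      · intro h; cases h
      · intro h
        exact absurd (Or.inl (List.isPrefixOf_iff_prefix.mp hp)) h
    · rw [if_neg hp]
      simp only [Option.map_eq_none_iff, ih, List.infix_cons_iff]
      constructor
      · intro h hor
        rcases hor with hpre | hin
        · exact hp (List.isPrefixOf_iff_prefix.mpr hpre)
        · exact h hin
      · intro h hin; exact h (Or.inr hin)

lemma pvSplitFirst_not_mem (s0 : Char) (sr : List Char) (l : List Char) (h : s0 ∉ l) :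
    pvSplitFirst s0 sr l = none := by
  rw [pvSplitFirst_eq_none_iff]
  intro hin
  exact h (hin.subset (by simp))

lemma pvSplitFirst_append_some (s0 : Char) (sr : List Char) :
    ∀ (X Y a b : List Char), pvSplitFirst s0 sr X = some (a, b) →
      pvSplitFirst s0 sr (X ++ Y) = some (a, b ++ Y) := by
  intro X
  induction X with
  | nil => intro Y a b h; simp [pvSplitFirst] at h
  | cons c rest ih =>
    intro Y a b h
    rw [pvSplitFirst] at h
    by_cases hp : (s0 :: sr).isPrefixOf (c :: rest)
    · rw [if_pos hp] at h
      obtain ⟨ha, hb⟩ : ([] : List Char) = a ∧ List.drop sr.length rest = b := by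
        simpa using h
      have hpre : (s0 :: sr) <+: (c :: rest) := List.isPrefixOf_iff_prefix.mp hp
      have hp' : (s0 :: sr).isPrefixOf (c :: rest ++ Y) :=
        List.isPrefixOf_iff_prefix.mpr (hpre.trans (List.prefix_append _ _))
      show pvSplitFirst s0 sr (c :: (rest ++ Y)) = _
      rw [pvSplitFirst, if_pos (by simpa using hp')]
      have hlen : sr.length ≤ rest.length := by
        have := hpre.length_le; simp at this; omega
      rw [List.drop_append_of_le_length hlen]
      rw [← ha, ← hb]
    · rw [if_neg hp] at h
      cases hq : pvSplitFirst s0 sr rest with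
      | none => rw [hq] at h; simp at h
      | some p =>
        cases p with | mk a' b' =>
        rw [hq] at h; simp at h
        obtain ⟨ha, hb⟩ := h
        have hp' : ¬ (s0 :: sr).isPrefixOf (c :: rest ++ Y) := by
          intro hcon
          have hpre : (s0 :: sr) <+: (c :: (rest ++ Y)) := List.isPrefixOf_iff_prefix.mp (by simpa using hcon)
          -- if sep fits inside c :: rest ++ Y but not c :: rest, then rest is too short:
          by_cases hlen : (s0 :: sr).length ≤ (c :: rest).length
          · exact hp (List.isPrefixOf_iff_prefix.mpr (List.prefix_of_prefix_length_le hpre (List.prefix_append _ _) (by simpa using hlen)))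
          · -- sep longer than c :: rest, but pvSplitFirst found it inside rest: contradiction
            have hsome : pvSplitFirst s0 sr rest ≠ none := by rw [hq]; simp
            rw [Ne, pvSplitFirst_eq_none_iff, not_not] at hsome
            have := hsome.length_le
            simp at hlen this; omega
        show pvSplitFirst s0 sr (c :: (rest ++ Y)) = _
        rw [pvSplitFirst, if_neg (by simpa using hp'), ih Y a' b' hq]
        simp [← ha, ← hb]

lemma pvSplitFirst_append_none (ell w : List Char)
    (h : pvSplitFirst ':' [' '] ell = none) (hw : ':' ∉ w)
    (hne : ¬ (ell.getLast? = some ':' ∧ w.head? = some ' ')) :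
    pvSplitFirst ':' [' '] (ell ++ w) = none := by
  induction ell with
  | nil => exact pvSplitFirst_not_mem ':' [' '] w hw
  | cons c rest ih =>
    rw [pvSplitFirst] at h
    show pvSplitFirst ':' [' '] (c :: (rest ++ w)) = none
    rw [pvSplitFirst]
    by_cases hp : ([':', ' '] : List Char).isPrefixOf (c :: rest)
    · rw [if_pos hp] at h; simp at h
    · rw [if_neg hp] at h
      have hrest : pvSplitFirst ':' [' '] rest = none := by
        cases hq : pvSplitFirst ':' [' '] rest with
        | none => rfl
        | some p => rw [hq] at h; simp at h
      by_cases hp2 : ([':', ' '] : List Char).isPrefixOf (c :: (rest ++ w))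
      · -- the straddle: possible only if rest = [] (else the prefix is visible in c :: rest)
        exfalso
        have hpre : [':', ' '] <+: (c :: (rest ++ w)) := List.isPrefixOf_iff_prefix.mp hp2
        obtain ⟨u, hu⟩ := hpre
        cases rest with
        | cons d rest' =>
          apply hp
          apply List.isPrefixOf_iff_prefix.mpr
          simp at hu
          exact ⟨rest', by simp [← hu.1, ← hu.2.1]⟩
        | nil =>
          simp at hu
          apply hne
          constructor
          · simp [← hu.1]
          · rw [← hu.2]; rfl
      · rw [if_neg hp2]
        have hih := ih hrest (by
          intro hcon
          apply hne
          refine ⟨?_, hcon.2⟩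
          cases rest with
          | nil => simp at hcon
          | cons d rest' => simpa using hcon.1)
        rw [hih]
        rfl

-- ---- the per-line action: bridging the ports' line body to pvStep ----
lemma pvLine_eq (rec : PySem.Dict String String) (line : List Char) :
    (if PySem.Chars.isIn [':', ' '] line then
      match PySem.Chars.splitOnMax line [':', ' '] 1 with
      | [key, value] =>
          rec.insert (String.ofList (PySem.Chars.strip key)) (String.ofList (PySem.Chars.strip value))
      | _ => rec
    else rec) = pvStep rec line := by
  unfold pvStep
  by_cases hin : PySem.Chars.isIn [':', ' '] line = true
  · rw [if_pos hin]
    have hinf : [':', ' '] <:+: line := (PySem.Chars.isIn_iff_infix _ _).mp hin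
    cases hq : pvSplitFirst ':' [' '] line with
    | none => exact absurd ((pvSplitFirst_eq_none_iff ':' [' '] line).mp hq) (not_not.mpr hinf)
    | some p =>
      cases p with | mk a b =>
      rw [pvSplitOnMax_eq ':' [' '] line, hq]
  · rw [if_neg hin]
    have hq : pvSplitFirst ':' [' '] line = none := by
      rw [pvSplitFirst_eq_none_iff]
      rw [← PySem.Chars.isIn_eq_false_iff]
      simpa using hin
    rw [hq]

lemma pvBStep_dash (st : List (List (String × String)) × PySem.Dict String String) :
    pvBStep st ['-', '-', '-'] = (pvFin st, PySem.Dict.mk []) := by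
  rfl

lemma pvBStep_ne_dash (st : List (List (String × String)) × PySem.Dict String String)
    (line : List Char) (h : line ≠ ['-', '-', '-']) :
    pvBStep st line = (st.1, pvStep st.2 line) := by
  unfold pvBStep pvStep
  rw [if_neg (by simpa using h)]
  by_cases hin : PySem.Chars.isIn [':', ' '] line = true
  · rw [if_pos hin]
    have hinf : [':', ' '] <:+: line := (PySem.Chars.isIn_iff_infix _ _).mp hin
    obtain ⟨a, b, hq⟩ : ∃ a b, pvSplitFirst ':' [' '] line = some (a, b) := by
      cases hq : pvSplitFirst ':' [' '] line with
      | none => exact absurd ((pvSplitFirst_eq_none_iff ':' [' '] line).mp hq) (not_not.mpr hinf)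
      | some p => cases p with | mk a b => exact ⟨a, b, rfl⟩
    rw [pvSplitOnMax_eq ':' [' '] line, hq]
  · rw [if_neg hin]
    have hq : pvSplitFirst ':' [' '] line = none := by
      rw [pvSplitFirst_eq_none_iff]
      rw [← PySem.Chars.isIn_eq_false_iff]
      simpa using hin
    rw [hq]

-- ---- strip lemmas ----
lemma pvRstrip_append_ws (l w : List Char) (hw : ∀ c ∈ w, PySem.Chars.isspace c = true) :
    PySem.Chars.rstrip (l ++ w) = PySem.Chars.rstrip l := by
  unfold PySem.Chars.rstrip
  rw [List.reverse_append, List.dropWhile_append]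
  have hws : List.dropWhile PySem.Chars.isspace w.reverse = [] := by
    rw [List.dropWhile_eq_nil_iff]
    intro x hx; exact hw x (by simpa using hx)
  rw [hws]
  simp

lemma pvRstrip_cons_not_ws (c : Char) (t : List Char) (hc : PySem.Chars.isspace c = false) :
    PySem.Chars.rstrip (c :: t) = c :: PySem.Chars.rstrip t := by
  unfold PySem.Chars.rstrip
  rw [List.reverse_cons, List.dropWhile_append]
  by_cases he : (List.dropWhile PySem.Chars.isspace t.reverse).isEmpty
  · rw [if_pos he]
    rw [List.isEmpty_iff] at he
    rw [he]
    simp [List.dropWhile, hc]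
  · rw [if_neg he]
    simp

lemma pvRstrip_eq_nil_iff (t : List Char) :
    PySem.Chars.rstrip t = [] ↔ ∀ c ∈ t, PySem.Chars.isspace c = true := by
  unfold PySem.Chars.rstrip
  rw [List.reverse_eq_nil_iff, List.dropWhile_eq_nil_iff]
  constructor
  · intro h c hc; exact h c (by simpa using hc)
  · intro h c hc; exact h c (by simpa using hc)

lemma pvRstrip_cons_ne_nil (c : Char) (t : List Char) (h : PySem.Chars.rstrip t ≠ []) :
    PySem.Chars.rstrip (c :: t) = c :: PySem.Chars.rstrip t := by
  unfold PySem.Chars.rstrip at h ⊢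
  rw [List.reverse_cons, List.dropWhile_append]
  rw [if_neg (by
    intro hcon
    rw [List.isEmpty_iff] at hcon
    rw [hcon] at h
    simp at h)]
  simp

lemma pvStrip_eq_lstrip_rstrip (s : List Char) :
    PySem.Chars.strip s = PySem.Chars.lstrip (PySem.Chars.rstrip s) := by
  unfold PySem.Chars.strip
  induction s with
  | nil => rfl
  | cons c t ih =>
    by_cases hc : PySem.Chars.isspace c = true
    · rw [show PySem.Chars.lstrip (c :: t) = PySem.Chars.lstrip t from by unfold PySem.Chars.lstrip; simp [hc]]
      rw [ih]
      by_cases hnil : PySem.Chars.rstrip t = []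
      · rw [hnil]
        have : PySem.Chars.rstrip (c :: t) = [] := by
          rw [pvRstrip_eq_nil_iff] at hnil ⊢
          intro x hx
          rcases List.mem_cons.mp hx with h1 | h2
          · rw [h1]; exact hc
          · exact hnil x h2
        rw [this]
      · rw [pvRstrip_cons_ne_nil c t hnil]
        obtain ⟨d, ds, hds⟩ : ∃ d ds, PySem.Chars.rstrip t = d :: ds := by
          cases hq : PySem.Chars.rstrip t with
          | nil => exact absurd hq hnil
          | cons d ds => exact ⟨d, ds, rfl⟩
        rw [hds]
        unfold PySem.Chars.lstrip
        simp [hc]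
    · have hc' : PySem.Chars.isspace c = false := by simpa using hc
      rw [show PySem.Chars.lstrip (c :: t) = c :: t from by unfold PySem.Chars.lstrip; simp [List.dropWhile, hc']]
      rw [pvRstrip_cons_not_ws c t hc']
      by_cases hnil : PySem.Chars.rstrip t = []
      · rw [hnil]
        unfold PySem.Chars.lstrip
        simp [List.dropWhile, hc']
      · rw [show PySem.Chars.lstrip (c :: PySem.Chars.rstrip t) = c :: PySem.Chars.rstrip t from by
          unfold PySem.Chars.lstrip; simp [List.dropWhile, hc']]

lemma pvStrip_append_ws (v w : List Char) (hw : ∀ c ∈ w, PySem.Chars.isspace c = true) :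
    PySem.Chars.strip (v ++ w) = PySem.Chars.strip v := by
  rw [pvStrip_eq_lstrip_rstrip, pvStrip_eq_lstrip_rstrip, pvRstrip_append_ws v w hw]

lemma pvRstrip_decomp (b : List Char) :
    b = PySem.Chars.rstrip b ++ (b.drop (PySem.Chars.rstrip b).length) ∧
    (∀ c ∈ b.drop (PySem.Chars.rstrip b).length, PySem.Chars.isspace c = true) := by
  have hb : b = PySem.Chars.rstrip b ++ (List.takeWhile PySem.Chars.isspace b.reverse).reverse := by
    conv_lhs => rw [← List.reverse_reverse b, ← List.takeWhile_append_dropWhile (p := PySem.Chars.isspace) (l := b.reverse)]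
    rw [List.reverse_append]
    rfl
  have key : ∀ (t w : List Char), b = t ++ w → t.length = (PySem.Chars.rstrip b).length → b.drop (PySem.Chars.rstrip b).length = w := by
    intro t w h hl
    rw [← hl, h, List.drop_left]
  have hdrop : b.drop (PySem.Chars.rstrip b).length = (List.takeWhile PySem.Chars.isspace b.reverse).reverse := key _ _ hb rfl
  constructor
  · rw [hdrop]
    exact hb
  · rw [hdrop]
    intro c hc
    exact List.mem_takeWhile_imp (by simpa using hc)

-- ---- pvStep invariances ----
lemma pvStep_dash (rec : PySem.Dict String String) : pvStep rec ['-', '-', '-'] = rec := by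
  rfl

lemma pvStep_ws_cons (rec : PySem.Dict String String) (c : Char) (l : List Char)
    (hc : PySem.Chars.isspace c = true) : pvStep rec (c :: l) = pvStep rec l := by
  have hcol : c ≠ ':' := by
    intro hcon; rw [hcon] at hc; simp [PySem.Chars.isspace] at hc
  unfold pvStep
  rw [pvSplitFirst]
  rw [if_neg (by
    intro hcon
    have := List.isPrefixOf_iff_prefix.mp hcon
    obtain ⟨u, hu⟩ := this
    simp at hu
    exact hcol hu.1.symm)]
  cases hq : pvSplitFirst ':' [' '] l with
  | none => rfl
  | some p =>
    cases p with | mk k v =>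
    simp only [Option.map_some]
    have hstrip : PySem.Chars.strip (c :: k) = PySem.Chars.strip k := by
      unfold PySem.Chars.strip PySem.Chars.lstrip
      simp [hc]
    rw [hstrip]

lemma pvStep_ws_line (rec : PySem.Dict String String) (l : List Char)
    (h : ∀ c ∈ l, PySem.Chars.isspace c = true) : pvStep rec l = rec := by
  unfold pvStep
  rw [pvSplitFirst_not_mem ':' [' '] l (by
    intro hmem
    have := h ':' hmem
    simp [PySem.Chars.isspace] at this)]

lemma pvStep_append_ws (rec : PySem.Dict String String) (ell w : List Char)
    (hw : ∀ c ∈ w, PySem.Chars.isspace c = true)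
    (hne : ¬ (ell.getLast? = some ':' ∧ ¬ [':', ' '] <:+: ell ∧ w.head? = some ' ')) :
    pvStep rec (ell ++ w) = pvStep rec ell := by
  have hwcol : ':' ∉ w := by
    intro hmem
    have := hw ':' hmem
    simp [PySem.Chars.isspace] at this
  by_cases hin : [':', ' '] <:+: ell
  · obtain ⟨a, b, hq⟩ : ∃ a b, pvSplitFirst ':' [' '] ell = some (a, b) := by
      cases hq : pvSplitFirst ':' [' '] ell with
      | none => exact absurd ((pvSplitFirst_eq_none_iff ':' [' '] ell).mp hq) (not_not.mpr hin)
      | some p => cases p with | mk a b => exact ⟨a, b, rfl⟩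
    unfold pvStep
    rw [hq, pvSplitFirst_append_some ':' [' '] ell w a b hq]
    simp only []
    rw [pvStrip_append_ws b w hw]
  · have hnone : pvSplitFirst ':' [' '] ell = none := (pvSplitFirst_eq_none_iff ':' [' '] ell).mpr hin
    unfold pvStep
    rw [hnone, pvSplitFirst_append_none ell w hnone hwcol (by
      intro hcon
      exact hne ⟨hcon.1, hin, hcon.2⟩)]

lemma pvJoin_cons_cons (sep x y : List Char) (xs : List (List Char)) :
    pvJoin sep (x :: y :: xs) = x ++ sep ++ pvJoin sep (y :: xs) := rfl

lemma pvJoin_append_mid : ∀ (u : List (List Char)) (x : List Char) (v : List (List Char)) (sep : List Char),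
    u ≠ [] → v ≠ [] → pvJoin sep (u ++ x :: v) = pvJoin sep u ++ sep ++ x ++ sep ++ pvJoin sep v := by
  intro u
  induction u with
  | nil => intro x v sep hu hv; exact absurd rfl hu
  | cons a u' ih =>
    intro x v sep _ hv
    cases u' with
    | nil =>
      cases v with
      | nil => exact absurd rfl hv
      | cons b v' =>
        show pvJoin sep (a :: x :: b :: v') = _
        rw [pvJoin_cons_cons, pvJoin_cons_cons]
        simp [pvJoin]
    | cons a2 u2 =>
      show pvJoin sep (a :: ((a2 :: u2) ++ x :: v)) = _
      have hne : (a2 :: u2) ++ x :: v ≠ [] := by simp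
      cases hq : (a2 :: u2) ++ x :: v with
      | nil => exact absurd hq hne
      | cons q qs =>
        rw [← hq]
        rw [show pvJoin sep (a :: ((a2 :: u2) ++ x :: v)) = a ++ sep ++ pvJoin sep ((a2 :: u2) ++ x :: v) from by
          rw [hq]; exact pvJoin_cons_cons sep a q qs]
        rw [ih x v sep (by simp) hv]
        rw [pvJoin_cons_cons]
        simp

-- ---- pvSplit structure lemmas (single-char separator = '\n') ----
lemma pvSplit_cons_sep (c : Char) (rest : List Char) :
    pvSplit c [] (c :: rest) = [] :: pvSplit c [] rest := by
  rw [pvSplit]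
  rw [if_pos (by simp [List.isPrefixOf])]
  rfl

lemma pvSplit_cons_ne (c d : Char) (rest : List Char) (h : d ≠ c) :
    pvSplit c [] (d :: rest) = (pvSplit c [] rest).modifyHead (d :: ·) := by
  rw [pvSplit]
  rw [if_neg (by simp [List.isPrefixOf]; intro hcon; exact absurd hcon.symm h)]

lemma pvSplit_nil (c : Char) (sr : List Char) : pvSplit c sr [] = [[]] := by
  rw [pvSplit]

lemma pvSplit_no_sep (c : Char) (l : List Char) (h : c ∉ l) : pvSplit c [] l = [l] := by
  induction l with
  | nil => rw [pvSplit_nil]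
  | cons d rest ih =>
    rw [pvSplit_cons_ne c d rest (by intro hcon; exact h (hcon ▸ List.mem_cons_self))]
    rw [ih (fun hm => h (List.mem_cons_of_mem d hm))]
    rfl

lemma pvSplit_append_sep (c : Char) : ∀ (X Y : List Char),
    pvSplit c [] (X ++ c :: Y) = pvSplit c [] X ++ pvSplit c [] Y := by
  intro X Y
  induction X with
  | nil =>
    simp only [List.nil_append]
    rw [pvSplit_cons_sep, pvSplit_nil]
    rfl
  | cons d X' ih =>
    by_cases hd : d = c
    · subst hd
      rw [show (d :: X') ++ d :: Y = d :: (X' ++ d :: Y) from rfl]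
      rw [pvSplit_cons_sep, pvSplit_cons_sep, ih]
      rfl
    · rw [show (d :: X') ++ c :: Y = d :: (X' ++ c :: Y) from rfl]
      rw [pvSplit_cons_ne c d _ hd, pvSplit_cons_ne c d _ hd, ih]
      cases hq : pvSplit c [] X' with
      | nil => exact absurd hq (pvSplit_ne_nil c [] X')
      | cons a t => simp

lemma pvSplit_append_last (c : Char) : ∀ (X w : List Char), c ∉ w →
    pvSplit c [] (X ++ w) =
      (pvSplit c [] X).dropLast ++ [(pvSplit c [] X).getLastD [] ++ w] := by
  intro X w hw
  induction X with
  | nil =>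
    simp only [List.nil_append]
    rw [pvSplit_no_sep c w hw, pvSplit_nil]
    rfl
  | cons d X' ih =>
    by_cases hd : d = c
    · subst hd
      rw [show (d :: X') ++ w = d :: (X' ++ w) from rfl]
      rw [pvSplit_cons_sep, pvSplit_cons_sep, ih]
      have hne := pvSplit_ne_nil d [] X'
      cases hq : pvSplit d [] X' with
      | nil => exact absurd hq hne
      | cons a t => simp
    · rw [show (d :: X') ++ w = d :: (X' ++ w) from rfl]
      rw [pvSplit_cons_ne c d _ hd, pvSplit_cons_ne c d _ hd, ih]
      cases hq : pvSplit c [] X' with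
      | nil => exact absurd hq (pvSplit_ne_nil c [] X')
      | cons a t =>
        cases t with
        | nil => simp
        | cons b t2 => simp

lemma pvSplit_chars_subset (s0 : Char) (sr : List Char) : ∀ (l : List Char),
    ∀ p ∈ pvSplit s0 sr l, ∀ x ∈ p, x ∈ l := by
  intro l
  induction l using pvSplit.induct s0 sr with
  | case1 => simp [pvSplit]
  | case2 c rest h ih =>
    rw [pvSplit, if_pos h]
    intro p hp x hx
    rcases List.mem_cons.mp hp with h1 | h2
    · rw [h1] at hx; cases hx
    · exact List.mem_cons_of_mem c (List.mem_of_mem_drop (ih p h2 x hx))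
  | case3 c rest h ih =>
    rw [pvSplit, if_neg h]
    intro p hp x hx
    cases hq : pvSplit s0 sr rest with
    | nil => exact absurd hq (pvSplit_ne_nil s0 sr rest)
    | cons a t =>
      rw [hq] at hp
      simp only [List.modifyHead] at hp
      rcases List.mem_cons.mp hp with h1 | h2
      · rw [h1] at hx
        rcases List.mem_cons.mp hx with h3 | h4
        · rw [h3]; exact List.mem_cons_self
        · exact List.mem_cons_of_mem c (ih a (by rw [hq]; exact List.mem_cons_self) x h4)
      · exact List.mem_cons_of_mem c (ih p (by rw [hq]; exact List.mem_cons_of_mem a h2) x hx)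

lemma pvSplit_head_prefix (s0 : Char) (sr : List Char) : ∀ (l : List Char),
    ∀ h, (pvSplit s0 sr l).head? = some h → h <+: l := by
  intro l
  induction l using pvSplit.induct s0 sr with
  | case1 => simp [pvSplit]
  | case2 c rest h ih =>
    rw [pvSplit, if_pos h]
    intro p hp
    simp at hp
    rw [hp]
    exact List.nil_prefix
  | case3 c rest h ih =>
    rw [pvSplit, if_neg h]
    intro p hp
    cases hq : pvSplit s0 sr rest with
    | nil => exact absurd hq (pvSplit_ne_nil s0 sr rest)
    | cons a t =>
      rw [hq] at hp
      simp only [List.modifyHead, List.head?] at hp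
      obtain hpa : p = c :: a := by
        have := hp
        simp at this
        exact this.symm
      rw [hpa]
      exact List.cons_prefix_cons.mpr ⟨rfl, ih a (by rw [hq]; rfl)⟩

lemma pvSplit_no_sep_infix (s0 : Char) (sr : List Char) : ∀ (l : List Char),
    ∀ p ∈ pvSplit s0 sr l, ¬ (s0 :: sr) <:+: p := by
  intro l
  induction l using pvSplit.induct s0 sr with
  | case1 =>
    rw [pvSplit_nil]
    intro p hp hinf
    simp at hp
    rw [hp] at hinf
    have := hinf.length_le
    simp at this
  | case2 c rest h ih =>
    rw [pvSplit, if_pos h]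
    intro p hp hinf
    rcases List.mem_cons.mp hp with h1 | h2
    · rw [h1] at hinf
      have := hinf.length_le
      simp at this
    · exact ih p h2 hinf
  | case3 c rest h ih =>
    rw [pvSplit, if_neg h]
    intro p hp hinf
    cases hq : pvSplit s0 sr rest with
    | nil => exact absurd hq (pvSplit_ne_nil s0 sr rest)
    | cons a t =>
      rw [hq] at hp
      simp only [List.modifyHead] at hp
      rcases List.mem_cons.mp hp with h1 | h2
      · rw [h1] at hinf
        rcases List.infix_cons_iff.mp hinf with h3 | h4
        · have ha : a <+: rest := pvSplit_head_prefix s0 sr rest a (by rw [hq]; rfl)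
          have : (s0 :: sr) <+: (c :: rest) := h3.trans (List.cons_prefix_cons.mpr ⟨rfl, ha⟩)
          exact absurd (List.isPrefixOf_iff_prefix.mpr this) (by simpa using h)
        · exact ih a (by rw [hq]; exact List.mem_cons_self) h4
      · exact ih p (by rw [hq]; exact List.mem_cons_of_mem a h2) hinf

lemma pvJoin_pvSplit (s0 : Char) (sr : List Char) : ∀ (l : List Char),
    pvJoin (s0 :: sr) (pvSplit s0 sr l) = l := by
  intro l
  induction l using pvSplit.induct s0 sr with
  | case1 => rw [pvSplit_nil]; rfl
  | case2 c rest h ih =>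
    rw [pvSplit, if_pos h]
    obtain ⟨t, ht⟩ := List.isPrefixOf_iff_prefix.mp h
    have hdrop : List.drop sr.length rest = t := by
      have := congrArg (List.drop (s0 :: sr).length) ht
      rw [List.drop_left] at this
      exact (by simpa using this : t = List.drop sr.length rest).symm
    cases hq : pvSplit s0 sr (List.drop sr.length rest) with
    | nil => exact absurd hq (pvSplit_ne_nil s0 sr _)
    | cons a t2 =>
      show ([] : List Char) ++ (s0 :: sr) ++ pvJoin (s0 :: sr) (a :: t2) = c :: rest
      rw [← hq, ih, hdrop]
      simpa using ht
  | case3 c rest h ih =>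
    rw [pvSplit, if_neg h]
    cases hq : pvSplit s0 sr rest with
    | nil => exact absurd hq (pvSplit_ne_nil s0 sr _)
    | cons a t =>
      rw [hq] at ih
      simp only [List.modifyHead]
      cases t with
      | nil =>
        show c :: a = c :: rest
        rw [show a = rest from by simpa [pvJoin] using ih]
      | cons b t2 =>
        show (c :: a) ++ (s0 :: sr) ++ pvJoin (s0 :: sr) (b :: t2) = c :: rest
        have : a ++ (s0 :: sr) ++ pvJoin (s0 :: sr) (b :: t2) = rest := ih
        rw [← this]
        simp

lemma pvSplit_nomid (b : List Char) (hb : ¬ ['\n', '-', '-', '-', '\n'] <:+: b) :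
    ∀ u v, pvSplit '\n' [] b = u ++ ['-', '-', '-'] :: v → u = [] ∨ v = [] := by
  intro u v heq
  by_contra hcon
  obtain ⟨hu, hv⟩ : u ≠ [] ∧ v ≠ [] := by
    constructor
    · intro h1; exact hcon (Or.inl h1)
    · intro h2; exact hcon (Or.inr h2)
  apply hb
  have hjoin := pvJoin_pvSplit '\n' [] b
  rw [heq] at hjoin
  rw [pvJoin_append_mid u ['-', '-', '-'] v ['\n'] hu hv] at hjoin
  exact ⟨pvJoin ['\n'] u, pvJoin ['\n'] v, by rw [← hjoin]; simp⟩

lemma pvInterp_join : ∀ (bs : List (List Char)), bs ≠ [] →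
    pvSplit '\n' [] (pvJoin ['\n', '-', '-', '-', '\n'] bs) = pvInterp bs := by
  intro bs
  induction bs with
  | nil => intro h; exact absurd rfl h
  | cons b bs' ih =>
    intro _
    cases bs' with
    | nil => rfl
    | cons c bs2 =>
      rw [pvJoin_cons_cons]
      rw [show (b ++ ['\n', '-', '-', '-', '\n'] ++ pvJoin ['\n', '-', '-', '-', '\n'] (c :: bs2)) =
            b ++ '\n' :: (['-', '-', '-'] ++ '\n' :: pvJoin ['\n', '-', '-', '-', '\n'] (c :: bs2)) from by simp]
      rw [pvSplit_append_sep, pvSplit_append_sep]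
      rw [pvSplit_no_sep '\n' ['-', '-', '-'] (by decide)]
      rw [ih (by simp)]
      show pvSplit '\n' [] b ++ (['-', '-', '-'] :: pvInterp (c :: bs2)) = pvInterp (b :: c :: bs2)
      rw [pvInterp]

-- ---- fold lemmas ----
lemma pvFold_id_of : ∀ (P : List (List Char)), (∀ p ∈ P, ∀ r : PySem.Dict String String, pvStep r p = r) →
    ∀ rec : PySem.Dict String String, P.foldl pvStep rec = rec := by
  intro P
  induction P with
  | nil => intro _ rec; rfl
  | cons a t ih =>
    intro hall rec
    rw [List.foldl_cons, hall a List.mem_cons_self rec]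
    exact ih (fun p hp r => hall p (List.mem_cons_of_mem a hp) r) rec

lemma pvFold_ws_lines (rec : PySem.Dict String String) (w : List Char)
    (hw : ∀ c ∈ w, PySem.Chars.isspace c = true) :
    (pvSplit '\n' [] w).foldl pvStep rec = rec := by
  exact pvFold_id_of (pvSplit '\n' [] w)
    (fun p hp r => pvStep_ws_line r p (fun c hc => hw c (pvSplit_chars_subset '\n' [] w p hp c hc))) rec

lemma pvFold_lstrip (rec : PySem.Dict String String) : ∀ (s : List Char),
    (pvSplit '\n' [] (PySem.Chars.lstrip s)).foldl pvStep rec = (pvSplit '\n' [] s).foldl pvStep rec := by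
  intro s
  induction s with
  | nil => rfl
  | cons c t ih =>
    by_cases hc : PySem.Chars.isspace c = true
    · rw [show PySem.Chars.lstrip (c :: t) = PySem.Chars.lstrip t from by
        unfold PySem.Chars.lstrip; simp [hc]]
      rw [ih]
      by_cases hnl : c = '\n'
      · subst hnl
        rw [pvSplit_cons_sep]
        rw [List.foldl_cons]
        rw [pvStep_ws_line rec [] (by simp)]
      · rw [pvSplit_cons_ne '\n' c t hnl]
        cases hq : pvSplit '\n' [] t with
        | nil => exact absurd hq (pvSplit_ne_nil _ _ _)
        | cons a T =>
          simp only [List.modifyHead, List.foldl_cons]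
          rw [pvStep_ws_cons rec c a hc]
    · rw [show PySem.Chars.lstrip (c :: t) = c :: t from by
        unfold PySem.Chars.lstrip
        simp [List.dropWhile, (by simpa using hc : PySem.Chars.isspace c = false)]]

lemma pvFold_rstrip_part (rec : PySem.Dict String String) (t w1 : List Char)
    (hw : ∀ c ∈ w1, PySem.Chars.isspace c = true) (hnl : '\n' ∉ w1)
    (hne : ¬ (((pvSplit '\n' [] t).getLastD []).getLast? = some ':' ∧
              ¬ [':', ' '] <:+: ((pvSplit '\n' [] t).getLastD []) ∧ w1.head? = some ' ')) :
    (pvSplit '\n' [] (t ++ w1)).foldl pvStep rec = (pvSplit '\n' [] t).foldl pvStep rec := by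
  rw [pvSplit_append_last '\n' t w1 hnl]
  rw [List.foldl_append]
  simp only [List.foldl_cons, List.foldl_nil]
  rw [pvStep_append_ws _ _ w1 hw hne]
  have hP : (pvSplit '\n' [] t).dropLast ++ [(pvSplit '\n' [] t).getLastD []] = pvSplit '\n' [] t := by
    have hne2 := pvSplit_ne_nil '\n' [] t
    rw [List.getLastD_eq_getLast?, List.getLast?_eq_some_getLast hne2, Option.getD_some]
    exact List.dropLast_append_getLast hne2
  conv_rhs => rw [← hP]
  rw [List.foldl_append]
  simp

lemma pvFold_strip (rec : PySem.Dict String String) (b : List Char) (hC : ¬ pvC b) :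
    (pvSplit '\n' [] (PySem.Chars.strip b)).foldl pvStep rec = (pvSplit '\n' [] b).foldl pvStep rec := by
  rw [pvStrip_eq_lstrip_rstrip, pvFold_lstrip]
  obtain ⟨hb, hwws⟩ := pvRstrip_decomp b
  set t := PySem.Chars.rstrip b with ht
  set w := b.drop t.length with hwdef
  unfold pvC at hC
  rw [← hwdef] at hC
  -- split w at its first newline
  have hsplit : w = w.takeWhile (fun c => c ≠ '\n') ++ w.dropWhile (fun c => c ≠ '\n') := (List.takeWhile_append_dropWhile).symm
  have hw1ws : ∀ c ∈ w.takeWhile (fun c => c ≠ '\n'), PySem.Chars.isspace c = true :=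
    fun c hc => hwws c ((List.takeWhile_sublist _).subset hc)
  have hw1nl : '\n' ∉ w.takeWhile (fun c => c ≠ '\n') := by
    intro hmem
    have := List.mem_takeWhile_imp hmem
    simp at this
  have hhead : ∀ x : Char, ((w.takeWhile (fun c => c ≠ '\n')).head? = some x) → w.head? = some x := by
    intro x hx
    cases hq : w with
    | nil => rw [hq] at hx; simp at hx
    | cons c w' =>
      rw [hq] at hx
      simp only [List.takeWhile_cons] at hx
      by_cases hc : c = '\n'
      · simp [hc] at hx
      · simp [hc] at hx
        simp [hx]
  have hne : ¬ (((pvSplit '\n' [] t).getLastD []).getLast? = some ':' ∧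
      ¬ [':', ' '] <:+: ((pvSplit '\n' [] t).getLastD []) ∧ (w.takeWhile (fun c => c ≠ '\n')).head? = some ' ') :=
    fun hcon => hC ⟨hcon.1, hcon.2.1, hhead ' ' hcon.2.2⟩
  cases hq : w.dropWhile (fun c => c ≠ '\n') with
  | nil =>
    rw [hq, List.append_nil] at hsplit
    conv_rhs => rw [hb, hsplit]
    exact (pvFold_rstrip_part rec t _ hw1ws hw1nl hne).symm
  | cons d w2 =>
    have hd : d = '\n' := by
      have := List.head?_dropWhile_not (p := fun c => decide (c ≠ '\n')) w
      rw [hq] at this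
      simpa using this
    subst hd
    conv_rhs => rw [hb, hsplit, hq]
    rw [show t ++ (w.takeWhile (fun c => decide (c ≠ '\n')) ++ '\n' :: w2) = (t ++ w.takeWhile (fun c => decide (c ≠ '\n'))) ++ '\n' :: w2 from by simp]
    rw [pvSplit_append_sep, List.foldl_append]
    rw [pvFold_rstrip_part rec t _ hw1ws hw1nl hne]
    exact (pvFold_ws_lines _ w2 (fun c hc => hwws c (by
      rw [hsplit, hq]
      exact List.mem_append_right _ (List.mem_cons_of_mem '\n' hc)))).symm

-- B run over one block's lines
lemma pvRun2 : ∀ (ls : List (List Char)),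
    (∀ u v, ls = u ++ ['-', '-', '-'] :: v → v = []) →
    ∀ (recs : List (List (String × String))) (rec : PySem.Dict String String),
      pvFin (ls.foldl pvBStep (recs, rec)) =
        (if (ls.foldl pvStep rec).items ≠ [] then recs ++ [(ls.foldl pvStep rec).items] else recs) := by
  intro ls
  induction ls with
  | nil => intro _ recs rec; rfl
  | cons x ls' ih =>
    intro h recs rec
    by_cases hx : x = ['-', '-', '-']
    · subst hx
      have hnil : ls' = [] := h [] ls' rfl
      subst hnil
      simp only [List.foldl_cons, List.foldl_nil]
      rw [pvBStep_dash, pvStep_dash]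
      rfl
    · simp only [List.foldl_cons]
      rw [pvBStep_ne_dash (recs, rec) x hx]
      have hmap : ∀ u v, ls' = u ++ ['-', '-', '-'] :: v → v = [] := by
        intro u v huv
        exact h (x :: u) v (by rw [huv]; rfl)
      exact ih hmap recs (pvStep rec x)

lemma pvRun : ∀ (ls : List (List Char)),
    (∀ u v, ls = u ++ ['-', '-', '-'] :: v → u = [] ∨ v = []) →
    ∀ (recs : List (List (String × String))),
      pvFin (ls.foldl pvBStep (recs, PySem.Dict.mk [])) =
        (if (ls.foldl pvStep (PySem.Dict.mk [])).items ≠ [] then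
          recs ++ [(ls.foldl pvStep (PySem.Dict.mk [])).items] else recs) := by
  intro ls h recs
  cases ls with
  | nil => rfl
  | cons x ls' =>
    by_cases hx : x = ['-', '-', '-']
    · subst hx
      simp only [List.foldl_cons]
      rw [pvBStep_dash, pvStep_dash]
      have hfin : pvFin (recs, PySem.Dict.mk []) = recs := by rfl
      rw [hfin]
      exact pvRun2 ls' (fun u v huv => by
        rcases h (['-', '-', '-'] :: u) v (by rw [huv]; rfl) with h1 | h2
        · cases h1
        · exact h2) recs (PySem.Dict.mk [])
    · exact pvRun2 (x :: ls') (fun u v huv => by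
        rcases h u v huv with h1 | h2
        · exfalso
          rw [h1] at huv
          simp at huv
          exact hx huv.1
        · exact h2) recs (PySem.Dict.mk [])

lemma pvBlock (b : List Char) (hi : ¬ ['\n', '-', '-', '-', '\n'] <:+: b) (hC : ¬ pvC b)
    (recs : List (List (String × String))) :
    pvFin ((pvSplit '\n' [] b).foldl pvBStep (recs, PySem.Dict.mk [])) = pvAStep recs b := by
  rw [pvRun (pvSplit '\n' [] b) (pvSplit_nomid b hi) recs]
  unfold pvAStep pvParse
  rw [pvFold_strip (PySem.Dict.mk []) b hC]

lemma pvMain : ∀ (bs : List (List Char)), bs ≠ [] →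
    (∀ b ∈ bs, ¬ ['\n', '-', '-', '-', '\n'] <:+: b ∧ ¬ pvC b) →
    ∀ (recs : List (List (String × String))),
      pvFin ((pvInterp bs).foldl pvBStep (recs, PySem.Dict.mk [])) = bs.foldl pvAStep recs := by
  intro bs
  induction bs with
  | nil => intro h _ _; exact absurd rfl h
  | cons b bs' ih =>
    intro _ hall recs
    cases bs' with
    | nil =>
      show pvFin ((pvSplit '\n' [] b).foldl pvBStep (recs, PySem.Dict.mk [])) = pvAStep recs b
      exact pvBlock b (hall b List.mem_cons_self).1 (hall b List.mem_cons_self).2 recs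
    | cons c bs2 =>
      show pvFin ((pvSplit '\n' [] b ++ ['-', '-', '-'] :: pvInterp (c :: bs2)).foldl pvBStep (recs, PySem.Dict.mk [])) = _
      rw [List.foldl_append]
      simp only [List.foldl_cons]
      rw [pvBStep_dash]
      rw [pvBlock b (hall b List.mem_cons_self).1 (hall b List.mem_cons_self).2 recs]
      exact ih (by simp) (fun x hx => hall x (List.mem_cons_of_mem b hx)) (pvAStep recs b)

-- ---- rewriting the ports ----
lemma pvA_eq (plain_text : String) :
    parse_records_from_body plain_text =
      (pvSplit '\n' ['-', '-', '-', '\n'] plain_text.toList).foldl pvAStep [] := by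
  unfold parse_records_from_body
  rw [pvSplitOn_eq '\n' ['-', '-', '-', '\n']]
  have hf : (fun (records : List (List (String × String))) (block : List Char) =>
      let rec0 : PySem.Dict String String :=
        (PySem.Chars.splitOn (PySem.Chars.strip block) ['\n']).foldl
          (fun rec line =>
            if PySem.Chars.isIn [':', ' '] line then
              match PySem.Chars.splitOnMax line [':', ' '] 1 with
              | [key, value] =>
                  rec.insert (String.ofList (PySem.Chars.strip key)) (String.ofList (PySem.Chars.strip value))
              | _ => rec
            else rec)
          (PySem.Dict.mk [])
      if rec0.items ≠ [] then records ++ [rec0.items] else records) = pvAStep := by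
    funext records block
    show (if _ then records ++ _ else records) = _
    unfold pvAStep pvParse
    rw [pvSplitOn_eq '\n' []]
    rw [show (fun (rec : PySem.Dict String String) (line : List Char) =>
        if PySem.Chars.isIn [':', ' '] line then
          match PySem.Chars.splitOnMax line [':', ' '] 1 with
          | [key, value] =>
              rec.insert (String.ofList (PySem.Chars.strip key)) (String.ofList (PySem.Chars.strip value))
          | _ => rec
        else rec) = pvStep from funext (fun rec => funext (fun line => pvLine_eq rec line))]
  rw [hf]

lemma pvB_eq (plain_text : String) :
    parse_records_from_body_alt plain_text =
      pvFin ((pvSplit '\n' [] plain_text.toList).foldl pvBStep ([], PySem.Dict.mk [])) := by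
  unfold parse_records_from_body_alt
  rw [pvSplitOn_eq '\n' []]
  rfl

lemma pvD_iff (plain_text : String) :
    D_parse_records_from_body plain_text ↔
      ∃ b ∈ pvSplit '\n' ['-', '-', '-', '\n'] plain_text.toList, pvC b := by
  unfold D_parse_records_from_body
  rw [show ("\n---\n".toList : List Char) = ['\n', '-', '-', '-', '\n'] from rfl,
      show ("\n".toList : List Char) = ['\n'] from rfl,
      show (":".toList : List Char) = [':'] from rfl,
      show (": ".toList : List Char) = [':', ' '] from rfl]
  rw [pvSplitOn_eq '\n' ['-', '-', '-', '\n']]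
  apply exists_congr
  intro b
  apply and_congr_right
  intro _
  unfold pvC
  rw [pvSplitOn_eq '\n' []]
  constructor
  · rintro ⟨h1, h2, h3⟩
    refine ⟨?_, ?_, ?_⟩
    · have := (PySem.Chars.endswith_iff _ _).mp h1
      obtain ⟨u, hu⟩ := this
      rw [List.getLast?_eq_some_iff]
      exact ⟨u, hu.symm⟩
    · exact (PySem.Chars.isIn_eq_false_iff _ _).mp h2
    · rw [List.head?_drop]
      rw [show ((PySem.Chars.rstrip b).length : Int) = ((PySem.Chars.rstrip b).length : Nat) from rfl] at h3
      rw [PySem.List.pyGet?_natCast] at h3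
      exact h3
  · rintro ⟨h1, h2, h3⟩
    refine ⟨?_, ?_, ?_⟩
    · apply (PySem.Chars.endswith_iff _ _).mpr
      obtain ⟨u, hu⟩ := List.getLast?_eq_some_iff.mp h1
      exact ⟨u, hu.symm⟩
    · exact (PySem.Chars.isIn_eq_false_iff _ _).mpr h2
    · rw [show ((PySem.Chars.rstrip b).length : Int) = ((PySem.Chars.rstrip b).length : Nat) from rfl]
      rw [PySem.List.pyGet?_natCast]
      rw [List.head?_drop] at h3
      exact h3

-- ===== VERDICT (by name: the statement is the Claim_ definition above) =====
theorem parse_records_from_body_spec : Claim_unchanged_parse_records_from_body := by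
  intro plain_text _hDom hD
  rw [pvA_eq, pvB_eq]
  set bs := pvSplit '\n' ['-', '-', '-', '\n'] plain_text.toList with hbs
  have hjoin : pvJoin ['\n', '-', '-', '-', '\n'] bs = plain_text.toList :=
    pvJoin_pvSplit '\n' ['-', '-', '-', '\n'] plain_text.toList
  have hne : bs ≠ [] := pvSplit_ne_nil _ _ _
  have hlines : pvSplit '\n' [] plain_text.toList = pvInterp bs := by
    rw [← hjoin]
    exact pvInterp_join bs hne
  rw [hlines]
  rw [pvMain bs hne (fun b hb => ⟨pvSplit_no_sep_infix '\n' ['-', '-', '-', '\n'] plain_text.toList b hb, by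
    intro hcon
    exact hD ((pvD_iff plain_text).mpr ⟨b, hb, hcon⟩)⟩) []]

theorem parse_records_from_body_changed : Claim_changed_parse_records_from_body := by
  unfold Claim_changed_parse_records_from_body; decide
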